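-- pv_equiv track=rewrite | github.com/Diegoeyza/Competitive_Prog | class/8(Dynamic)/apples.py | simulate_middle_start
-- ===== SOURCE A (Python) =====
-- def simulate_middle_start(n, k):
--     total_cost = 0
--     weights = [k + i for i in range(1, n + 1)]  # 1-based indexing
--
--     for target in range(1, n + 1):  # assuming apple at 'target' is sweet
--         cost = 0
--         l, r = 1, n
--
--         # find initial middle index (middle-1 if even length)
--         length = r - l + 1
--         if length % 2 == 0:
--             mid = l + length // 2 - 1
--         else:
--             mid = l + length // 2
--
--         while True:
--             cost += weights[mid - 1]
--             if mid == target: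
--                 # found sweet apple
--                 break
--             elif mid < target:
--                 # apple at mid is bitter, sweet is to the right
--                 l = mid + 1
--                 length = r - l + 1
--                 if length == 1:
--                     # only one left to right, which must be sweet
--                     # no need to eat it
--                     break
--                 if length % 2 == 0:
--                     mid = l + length // 2 - 1
--                 else:
--                     mid = l + length // 2
--             else:
--                 # apple at mid is sour, sweet is to the left
--                 r = mid - 1
--                 length = r - l + 1
--                 if length == 1:
--                     # only one left to left, which must be sweet
--                     # no need to eat it
--                     break
--                 if length % 2 == 0:
--                     mid = l + length // 2 - 1
--                 else:
--                     mid = l + length // 2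
--
--         total_cost += cost
--
--     return total_cost
-- ===== SOURCE B (Python) =====
-- def simulate_middle_start(n, k):
--     # Single recursion over the distinct search ranges: every target in [l, r]
--     # eats the middle apple of that range, so add its weight once multiplied by
--     # the range size, then recurse into the two sub-ranges (a sub-range of size
--     # 1 costs nothing: the search stops without eating there).
--     if n < 1:
--         return 0
--
--     def g(l, r):
--         m = l + (r - l) // 2
--         s = (r - l + 1) * (k + m)
--         if l < m - 1:
--             s += g(l, m - 1)
--         if m + 1 < r:
--             s += g(m + 1, r)
--         return s
--
--     return g(1, n)
-- ===== Notes on version B (the rewrite author's own statement) =====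
-- stated objective: faster
-- what changed: Replaces the per-target binary-search simulation with one recursion over the O(n) distinct search ranges, adding each range's middle weight times the number of targets that pass through it.
import Mathlib
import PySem

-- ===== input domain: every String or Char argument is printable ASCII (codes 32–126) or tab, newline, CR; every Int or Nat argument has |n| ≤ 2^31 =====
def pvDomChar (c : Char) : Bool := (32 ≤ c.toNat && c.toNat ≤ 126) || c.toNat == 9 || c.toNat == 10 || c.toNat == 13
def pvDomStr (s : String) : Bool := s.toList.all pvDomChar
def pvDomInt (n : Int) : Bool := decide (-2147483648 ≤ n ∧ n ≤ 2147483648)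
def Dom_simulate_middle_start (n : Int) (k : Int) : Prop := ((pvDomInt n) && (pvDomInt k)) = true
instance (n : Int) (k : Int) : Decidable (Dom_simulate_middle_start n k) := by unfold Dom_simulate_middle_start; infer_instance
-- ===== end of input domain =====

-- B replaces A's per-target binary-search simulation by one recursion over the
-- distinct search ranges (objective: faster; measured).

-- ===== PORT A =====
-- A duplicates the "middle index (middle-1 if even length)" computation three
-- times; the helper below is that computation, used at each of the three spots.
def pvMid (l r : Int) : Int :=
  let length := r - l + 1
  if PySem.Int.mod length 2 = 0 then l + PySem.Int.floordiv length 2 - 1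
  else l + PySem.Int.floordiv length 2

-- weights = [k + i for i in range(1, n + 1)]; held as an Array (same values as the
-- Python list) so that the port's lookups are O(1), like Python's list indexing.
def pvWeights (n k : Int) : Array Int := ((PySem.List.pyRange 1 (n + 1) 1).map (fun i => k + i)).toArray

-- A's `while True` loop; the Nat fuel is only a totality guard (one unit per
-- iteration; the range shrinks strictly, so fuel = n suffices — proved below).
-- weights[mid - 1] is ported as Array.getD: the index is always in range here
-- (1 ≤ mid ≤ n is an invariant of the loop, proved in pvLoop_eq_pvC), so the
-- default is never used and Python never raises.
def pvLoop (w : Array Int) (target : Int) : Nat → Int → Int → Int → Int → Int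
  | 0, _, _, _, cost => cost
  | fuel + 1, l, r, mid, cost =>
    let cost := cost + w.getD (mid - 1).toNat 0
    if mid = target then cost
    else if mid < target then
      let l := mid + 1
      let length := r - l + 1
      if length = 1 then cost
      else pvLoop w target fuel l r (pvMid l r) cost
    else
      let r := mid - 1
      let length := r - l + 1
      if length = 1 then cost
      else pvLoop w target fuel l r (pvMid l r) cost

def simulate_middle_start (n : Int) (k : Int) : Int :=
  let weights := pvWeights n k
  (PySem.List.pyRange 1 (n + 1) 1).foldl
    (fun total_cost target => total_cost + pvLoop weights target n.toNat 1 n (pvMid 1 n) 0) 0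

-- ===== PORT B =====
def pvG (k : Int) (l r : Int) : Int :=
  let m := l + PySem.Int.floordiv (r - l) 2
  let s := (r - l + 1) * (k + m)
  let s := if l < m - 1 then s + pvG k l (m - 1) else s
  let s := if m + 1 < r then s + pvG k (m + 1) r else s
  s
termination_by (r - l).toNat
decreasing_by
  · have := PySem.Int.floordiv_eq_ediv_of_pos (a := r - l) (b := 2) (by omega)
    omega
  · have := PySem.Int.floordiv_eq_ediv_of_pos (a := r - l) (b := 2) (by omega)
    omega

def simulate_middle_start_alt (n : Int) (k : Int) : Int :=
  if n < 1 then 0 else pvG k 1 n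

-- ===== PRECONDITION & SPEC =====
def Spec_simulate_middle_start (n : Int) (k : Int) (out : Int) : Prop := out = simulate_middle_start_alt n k
instance (n : Int) (k : Int) (out : Int) : Decidable (Spec_simulate_middle_start n k out) := by unfold Spec_simulate_middle_start; infer_instance

-- ===== CLAIM (what is proved, stated in full; the proofs are below) =====
def Claim_equal_simulate_middle_start : Prop := ∀ (n : Int) (k : Int), Dom_simulate_middle_start n k → Spec_simulate_middle_start n k (simulate_middle_start n k)

-- ===== LEMMAS AND PROOFS =====

-- The middle index is the usual lower midpoint.
theorem pvMid_eq (l r : Int) : pvMid l r = l + (r - l) / 2 := by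
  unfold pvMid
  have h1 := PySem.Int.floordiv_eq_ediv_of_pos (a := r - l + 1) (b := 2) (by omega)
  have h2 := PySem.Int.mod_eq_emod_of_pos (a := r - l + 1) (b := 2) (by omega)
  simp only [h1, h2]
  split_ifs with h <;> omega

-- weights[mid - 1] = k + mid for 1 ≤ mid ≤ n.
theorem pvWeights_get (n k m : Int) (h1 : 1 ≤ m) (h2 : m ≤ n) :
    (pvWeights n k).getD (m - 1).toNat 0 = k + m := by
  unfold pvWeights
  have hlen : ((PySem.List.pyRange 1 (n + 1) 1).map (fun i => k + i)).toArray.size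
      = (n + 1 - 1).toNat := by
    simp [PySem.List.length_pyRange_one]
  rw [Array.getD]
  split
  · simp only [Array.getInternal_eq_getElem, List.getElem_toArray, List.getElem_map,
      PySem.List.getElem_pyRange_one]
    omega
  · omega

-- Proof-side characterisation of A's while loop as a structural recursion.
def pvC (k : Int) (l r t : Int) : Int :=
  let m := l + (r - l) / 2
  (k + m) +
    (if t = m then 0
     else if m < t then (if r ≤ m + 1 then 0 else pvC k (m + 1) r t)
     else (if m ≤ l + 1 then 0 else pvC k l (m - 1) t))
termination_by (r - l).toNat
decreasing_by all_goals omega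

-- One-step unfolding of pvC with the midpoint named.
theorem pvC_unfold (k l r t m : Int) (hm : m = l + (r - l) / 2) :
    pvC k l r t = (k + m) +
      (if t = m then 0
       else if m < t then (if r ≤ m + 1 then 0 else pvC k (m + 1) r t)
       else (if m ≤ l + 1 then 0 else pvC k l (m - 1) t)) := by
  subst hm; rw [pvC]

-- A's loop equals pvC, given the loop invariants and enough fuel.
theorem pvLoop_eq_pvC (n k : Int) :
    ∀ (fuel : Nat) (l r t cost : Int), 1 ≤ l → l ≤ r → r ≤ n → l ≤ t → t ≤ r →
    (r - l).toNat < fuel →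
    pvLoop (pvWeights n k) t fuel l r (pvMid l r) cost = cost + pvC k l r t := by
  intro fuel
  induction fuel with
  | zero => intro l r t cost _ _ _ _ _ hf; omega
  | succ f ih =>
    intro l r t cost hl hlr hr hlt htr hf
    rw [pvC]
    have hm : pvMid l r = l + (r - l) / 2 := pvMid_eq l r
    have hmb : l ≤ l + (r - l) / 2 ∧ l + (r - l) / 2 ≤ r := by omega
    rw [pvLoop]
    simp only [hm]
    rw [pvWeights_get n k _ (by omega) (by omega)]
    set m := l + (r - l) / 2 with hmdef
    by_cases h1 : m = t
    · simp [h1]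
    · rw [if_neg h1]
      by_cases h2 : m < t
      · rw [if_pos h2]
        have ht : ¬ t = m := fun h => h1 h.symm
        rw [if_neg ht, if_pos h2]
        by_cases h3 : r - (m + 1) + 1 = 1
        · rw [if_pos h3, if_pos (by omega)]; ring
        · rw [if_neg h3, if_neg (by omega)]
          rw [ih (m + 1) r t _ (by omega) (by omega) hr (by omega) htr (by omega)]
          ring
      · rw [if_neg h2]
        have ht : ¬ t = m := fun h => h1 h.symm
        rw [if_neg ht, if_neg h2]
        by_cases h3 : m - 1 - l + 1 = 1
        · rw [if_pos h3, if_pos (by omega)]; ring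
        · rw [if_neg h3, if_neg (by omega)]
          rw [ih l (m - 1) t _ hl (by omega) (by omega) hlt (by omega) (by omega)]
          ring

-- Summing pvC over all targets in [l, r] gives B's range recursion pvG.
theorem sum_pvC_eq_pvG (k : Int) :
    ∀ (N : Nat) (l r : Int), l ≤ r → (r - l).toNat ≤ N →
    ((PySem.List.pyRange l (r + 1) 1).map (pvC k l r)).sum = pvG k l r := by
  intro N
  induction N with
  | zero =>
    intro l r hlr hN
    have h : l = r := by omega
    subst h
    have h0 : PySem.Int.floordiv (l - l) 2 = 0 := by
      rw [PySem.Int.floordiv_eq_ediv_of_pos (by omega)]; omega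
    rw [PySem.List.pyRange_one_singleton, pvG]
    simp only [List.map_cons, List.map_nil, List.sum_cons, List.sum_nil, h0]
    rw [pvC_unfold k l l l l (by omega), if_pos rfl]
    split_ifs <;> omega
  | succ N ih =>
    intro l r hlr hN
    rw [pvG]
    have hfd : PySem.Int.floordiv (r - l) 2 = (r - l) / 2 :=
      PySem.Int.floordiv_eq_ediv_of_pos (by omega)
    simp only [hfd]
    set m := l + (r - l) / 2 with hmdef
    have hmb : l ≤ m ∧ m ≤ r := by omega
    -- split the targets into [l, m), {m}, (m, r]
    rw [PySem.List.pyRange_one_append l m (r + 1) (by omega) (by omega),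
        PySem.List.pyRange_one_append m (m + 1) (r + 1) (by omega) (by omega),
        PySem.List.pyRange_one_singleton]
    simp only [List.map_append, List.sum_append, List.map_cons, List.map_nil,
      List.sum_cons, List.sum_nil]
    -- the middle target eats only the middle apple
    have hmid : pvC k l r m = (k + m) + 0 := by
      rw [pvC_unfold k l r m m hmdef, if_pos rfl]
    -- targets left of the middle
    have hleft : (List.map (pvC k l r) (PySem.List.pyRange l m)).sum
        = (m - l) * (k + m)
          + (List.map (fun t => if m ≤ l + 1 then 0 else pvC k l (m - 1) t)
              (PySem.List.pyRange l m)).sum := by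
      rw [List.map_congr_left (g := fun t =>
            (k + m) + (if m ≤ l + 1 then 0 else pvC k l (m - 1) t))
          (fun t htm => by
            have hb := PySem.List.mem_pyRange_one.mp htm
            rw [pvC_unfold k l r t m hmdef, if_neg (by omega), if_neg (by omega)])]
      rw [PySem.List.sum_map_add_int, PySem.List.sum_map_const_int,
          PySem.List.length_pyRange_one,
          show ((m - l).toNat : Int) = m - l by omega]
    -- targets right of the middle
    have hright : (List.map (pvC k l r) (PySem.List.pyRange (m + 1) (r + 1))).sum
        = (r - m) * (k + m)
          + (List.map (fun t => if r ≤ m + 1 then 0 else pvC k (m + 1) r t)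
              (PySem.List.pyRange (m + 1) (r + 1))).sum := by
      rw [List.map_congr_left (g := fun t =>
            (k + m) + (if r ≤ m + 1 then 0 else pvC k (m + 1) r t))
          (fun t htm => by
            have hb := PySem.List.mem_pyRange_one.mp htm
            rw [pvC_unfold k l r t m hmdef, if_neg (by omega), if_pos (by omega)])]
      rw [PySem.List.sum_map_add_int, PySem.List.sum_map_const_int,
          PySem.List.length_pyRange_one,
          show ((r + 1 - (m + 1)).toNat : Int) = r - m by omega]
    rw [hmid, hleft, hright]
    by_cases hL : l < m - 1
    · rw [if_pos hL]
      have hLs : (List.map (fun t => if m ≤ l + 1 then 0 else pvC k l (m - 1) t)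
            (PySem.List.pyRange l m)).sum
          = (List.map (pvC k l (m - 1)) (PySem.List.pyRange l m)).sum := by
        simp only [if_neg (show ¬ m ≤ l + 1 by omega)]
      have ihL := ih l (m - 1) (by omega) (by omega)
      rw [show m - 1 + 1 = m by ring] at ihL
      rw [hLs, ihL]
      by_cases hR : m + 1 < r
      · rw [if_pos hR]
        have hRs : (List.map (fun t => if r ≤ m + 1 then 0 else pvC k (m + 1) r t)
              (PySem.List.pyRange (m + 1) (r + 1))).sum
            = (List.map (pvC k (m + 1) r) (PySem.List.pyRange (m + 1) (r + 1))).sum := by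
          simp only [if_neg (show ¬ r ≤ m + 1 by omega)]
        rw [hRs, ih (m + 1) r (by omega) (by omega)]
        ring
      · rw [if_neg hR]
        simp only [if_pos (show r ≤ m + 1 by omega)]
        simp
        ring
    · rw [if_neg hL]
      have hLz : (List.map (fun t => if m ≤ l + 1 then 0 else pvC k l (m - 1) t)
            (PySem.List.pyRange l m)).sum = 0 := by
        simp only [if_pos (show m ≤ l + 1 by omega)]
        simp
      rw [hLz]
      by_cases hR : m + 1 < r
      · rw [if_pos hR]
        have hRs : (List.map (fun t => if r ≤ m + 1 then 0 else pvC k (m + 1) r t)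
              (PySem.List.pyRange (m + 1) (r + 1))).sum
            = (List.map (pvC k (m + 1) r) (PySem.List.pyRange (m + 1) (r + 1))).sum := by
          simp only [if_neg (show ¬ r ≤ m + 1 by omega)]
        rw [hRs, ih (m + 1) r (by omega) (by omega)]
        ring
      · rw [if_neg hR]
        simp only [if_pos (show r ≤ m + 1 by omega)]
        simp
        ring

theorem simulate_middle_start_spec : Claim_equal_simulate_middle_start := by
  intro n k _
  unfold Spec_simulate_middle_start simulate_middle_start simulate_middle_start_alt
  by_cases hn : n < 1
  · rw [if_pos hn, PySem.List.pyRange_one_eq_nil (by omega)]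
    simp
  · rw [if_neg hn, PySem.List.foldl_add]
    rw [List.map_congr_left (g := pvC k 1 n)
        (fun t htm => by
          have hb := PySem.List.mem_pyRange_one.mp htm
          have := pvLoop_eq_pvC n k n.toNat 1 n t 0 (by omega) (by omega) (by omega)
            (by omega) (by omega) (by omega)
          simpa using this)]
    rw [sum_pvC_eq_pvG k (n - 1).toNat 1 n (by omega) (by omega)]
    simp
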